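-- pv_equiv track=rewrite | github.com/leejunhyuk1061204/AI-5-main-project | ai/app/services/yolo_service.py | get_category_from_label
-- ===== SOURCE A (Python) =====
-- def get_category_from_label(label_name: str) -> str:
--     """
--     라벨 이름에서 카테고리 자동 추출
--
--     규칙:
--     - 접두사 DASH_, EXT_, TIRE_ 등으로 시작하면 해당 카테고리
--     - 또는 키워드 포함 여부로 판단
--     """
--     label_upper = label_name.upper()
--
--     # 1. 접두사 규칙 (권장: 학습 데이터에 접두사 사용)
--     if label_upper.startswith("DASH_"):
--         return "DASHBOARD"
--     elif label_upper.startswith("EXT_"):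
--         return "EXTERIOR"
--     elif label_upper.startswith("TIRE_"):
--         return "TIRES_WHEELS_IMAGE"
--     elif label_upper.startswith("GLASS_"):
--         return "GLASS_WINDOWS"
--     elif label_upper.startswith("LIGHT_"):
--         return "LIGHTS"
--     elif label_upper.startswith("ENG_"):
--         return "ENGINE_ROOM"
--     elif label_upper.startswith("UNDER_"):
--         return "UNDERBODY"
--     elif label_upper.startswith("INT_"):
--         return "INTERIOR"
--
--     # 2. 키워드 규칙 (기존 Roboflow 데이터용)
--     dashboard_keywords = ["ENGINE", "OIL", "BATTERY", "ABS", "AIRBAG", "TEMP", "FUEL", "BRAKE", "DOOR", "SEATBELT"]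
--     exterior_keywords = ["SCRATCH", "DENT", "CRACK", "RUST", "PAINT"]
--     tire_keywords = ["TIRE", "WHEEL", "FLAT", "WORN"]
--
--     for kw in dashboard_keywords:
--         if kw in label_upper:
--             return "DASHBOARD"
--     for kw in exterior_keywords:
--         if kw in label_upper:
--             return "EXTERIOR"
--     for kw in tire_keywords:
--         if kw in label_upper:
--             return "TIRES_WHEELS_IMAGE"
--
--     # 3. 기본값
--     return "UNKNOWN_IMAGE"
-- ===== SOURCE B (Python) =====
-- # Single-pass sliding-window matcher: one unified rule table (priority, pattern,
-- # anchored, category); scan every position of the upper-cased label once and keep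
-- # the best (lowest-priority-number) rule that matches; anchored rules only match
-- # at position 0.  Returns the category of the best match, UNKNOWN_IMAGE if none.
-- _RULES = [
--     (0, "DASH_", True, "DASHBOARD"),
--     (0, "EXT_", True, "EXTERIOR"),
--     (0, "TIRE_", True, "TIRES_WHEELS_IMAGE"),
--     (0, "GLASS_", True, "GLASS_WINDOWS"),
--     (0, "LIGHT_", True, "LIGHTS"),
--     (0, "ENG_", True, "ENGINE_ROOM"),
--     (0, "UNDER_", True, "UNDERBODY"),
--     (0, "INT_", True, "INTERIOR"),
--     (1, "ENGINE", False, "DASHBOARD"),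
--     (1, "OIL", False, "DASHBOARD"),
--     (1, "BATTERY", False, "DASHBOARD"),
--     (1, "ABS", False, "DASHBOARD"),
--     (1, "AIRBAG", False, "DASHBOARD"),
--     (1, "TEMP", False, "DASHBOARD"),
--     (1, "FUEL", False, "DASHBOARD"),
--     (1, "BRAKE", False, "DASHBOARD"),
--     (1, "DOOR", False, "DASHBOARD"),
--     (1, "SEATBELT", False, "DASHBOARD"),
--     (2, "SCRATCH", False, "EXTERIOR"),
--     (2, "DENT", False, "EXTERIOR"),
--     (2, "CRACK", False, "EXTERIOR"),
--     (2, "RUST", False, "EXTERIOR"),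
--     (2, "PAINT", False, "EXTERIOR"),
--     (3, "TIRE", False, "TIRES_WHEELS_IMAGE"),
--     (3, "WHEEL", False, "TIRES_WHEELS_IMAGE"),
--     (3, "FLAT", False, "TIRES_WHEELS_IMAGE"),
--     (3, "WORN", False, "TIRES_WHEELS_IMAGE"),
-- ]
--
--
-- def get_category_from_label(label_name: str) -> str:
--     best_prio, best_cat = 4, "UNKNOWN_IMAGE"
--     suffix = label_name.upper()
--     at_start = True
--     while True:
--         for prio, pat, anchored, cat in _RULES:
--             if prio < best_prio and (at_start or not anchored) and suffix.startswith(pat):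
--                 best_prio, best_cat = prio, cat
--         if not suffix:
--             break
--         suffix = suffix[1:]
--         at_start = False
--     return best_cat
-- ===== Notes on version B (the rewrite author's own statement) =====
-- stated objective: alternative
-- what changed: A's ordered early-return checks (8 startswith tests, then three staged substring-containment loops) are replaced by a single sliding-window pass over every position of the upper-cased label with one unified (priority, pattern, anchored, category) rule table and a best-priority accumulator; the answer is the category of the minimum-priority rule that matches anywhere (anchored rules only at position 0).
import Mathlib
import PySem

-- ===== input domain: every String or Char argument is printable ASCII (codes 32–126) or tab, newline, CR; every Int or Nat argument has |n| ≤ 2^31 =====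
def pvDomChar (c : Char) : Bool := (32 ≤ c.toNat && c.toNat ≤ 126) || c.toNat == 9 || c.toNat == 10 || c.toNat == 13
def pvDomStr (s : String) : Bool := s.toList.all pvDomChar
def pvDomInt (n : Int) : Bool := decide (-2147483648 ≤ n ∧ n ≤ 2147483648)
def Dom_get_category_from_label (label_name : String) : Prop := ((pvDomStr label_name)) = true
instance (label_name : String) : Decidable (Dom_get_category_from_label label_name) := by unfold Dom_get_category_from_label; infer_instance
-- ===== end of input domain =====

-- B replaces A's ordered early-return checks (8 startswith tests, then three staged keyword
-- containment loops) by a single sliding-window pass over every position of the upper-cased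
-- label with one unified (priority, pattern, anchored, category) rule table and a
-- best-priority accumulator (alternative decomposition, same asymptotic cost).

-- ===== PORT A =====
-- A's 'for kw in kws: if kw in label_upper: return cat' loop, as structural recursion
def pvKwAny (u : String) : List String → Bool
  | [] => false
  | k :: rest => if PySem.Str.isIn k u then true else pvKwAny u rest

def get_category_from_label (label_name : String) : String :=
  let label_upper := PySem.Str.upper label_name
  if PySem.Str.startswith label_upper "DASH_" then "DASHBOARD"
  else if PySem.Str.startswith label_upper "EXT_" then "EXTERIOR"
  else if PySem.Str.startswith label_upper "TIRE_" then "TIRES_WHEELS_IMAGE"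
  else if PySem.Str.startswith label_upper "GLASS_" then "GLASS_WINDOWS"
  else if PySem.Str.startswith label_upper "LIGHT_" then "LIGHTS"
  else if PySem.Str.startswith label_upper "ENG_" then "ENGINE_ROOM"
  else if PySem.Str.startswith label_upper "UNDER_" then "UNDERBODY"
  else if PySem.Str.startswith label_upper "INT_" then "INTERIOR"
  else if pvKwAny label_upper ["ENGINE", "OIL", "BATTERY", "ABS", "AIRBAG", "TEMP", "FUEL", "BRAKE", "DOOR", "SEATBELT"] then "DASHBOARD"
  else if pvKwAny label_upper ["SCRATCH", "DENT", "CRACK", "RUST", "PAINT"] then "EXTERIOR"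
  else if pvKwAny label_upper ["TIRE", "WHEEL", "FLAT", "WORN"] then "TIRES_WHEELS_IMAGE"
  else "UNKNOWN_IMAGE"

-- ===== PORT B =====
-- Source B's _RULES table: (priority, pattern, anchored, category)
def pvRules : List (Int × String × Bool × String) :=
  [(0, "DASH_", true, "DASHBOARD"),
   (0, "EXT_", true, "EXTERIOR"),
   (0, "TIRE_", true, "TIRES_WHEELS_IMAGE"),
   (0, "GLASS_", true, "GLASS_WINDOWS"),
   (0, "LIGHT_", true, "LIGHTS"),
   (0, "ENG_", true, "ENGINE_ROOM"),
   (0, "UNDER_", true, "UNDERBODY"),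
   (0, "INT_", true, "INTERIOR"),
   (1, "ENGINE", false, "DASHBOARD"), (1, "OIL", false, "DASHBOARD"),
   (1, "BATTERY", false, "DASHBOARD"), (1, "ABS", false, "DASHBOARD"),
   (1, "AIRBAG", false, "DASHBOARD"), (1, "TEMP", false, "DASHBOARD"),
   (1, "FUEL", false, "DASHBOARD"), (1, "BRAKE", false, "DASHBOARD"),
   (1, "DOOR", false, "DASHBOARD"), (1, "SEATBELT", false, "DASHBOARD"),
   (2, "SCRATCH", false, "EXTERIOR"), (2, "DENT", false, "EXTERIOR"),
   (2, "CRACK", false, "EXTERIOR"), (2, "RUST", false, "EXTERIOR"),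
   (2, "PAINT", false, "EXTERIOR"),
   (3, "TIRE", false, "TIRES_WHEELS_IMAGE"), (3, "WHEEL", false, "TIRES_WHEELS_IMAGE"),
   (3, "FLAT", false, "TIRES_WHEELS_IMAGE"), (3, "WORN", false, "TIRES_WHEELS_IMAGE")]

-- body of Source B's inner 'for prio, pat, anchored, cat in _RULES' loop (strings as List Char)
def pvUpd (suffix : List Char) (atStart : Bool) (b : Int × String)
    (r : Int × String × Bool × String) : Int × String :=
  if r.1 < b.1 ∧ (atStart = true ∨ r.2.2.1 = false) ∧
      PySem.Chars.startswith suffix r.2.1.toList = true then (r.1, r.2.2.2) else b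

-- one iteration of the while loop over the current suffix
def pvStep (suffix : List Char) (atStart : Bool) (best : Int × String) : Int × String :=
  pvRules.foldl (pvUpd suffix atStart) best

-- Source B's 'while True: … suffix = suffix[1:]' loop, as structural recursion on the suffix
def pvScan (suffix : List Char) (atStart : Bool) (best : Int × String) : Int × String :=
  let best' := pvStep suffix atStart best
  match suffix with
  | [] => best'
  | _ :: rest => pvScan rest false best'

def get_category_from_label_alt (label_name : String) : String :=
  (pvScan (PySem.Str.upper label_name).toList true (4, "UNKNOWN_IMAGE")).2

-- ===== PRECONDITION & SPEC =====
def Spec_get_category_from_label (label_name : String) (out : String) : Prop := out = get_category_from_label_alt label_name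
instance (label_name : String) (out : String) : Decidable (Spec_get_category_from_label label_name out) := by unfold Spec_get_category_from_label; infer_instance

-- ===== CLAIM (what is proved, stated in full; the proofs are below) =====
def Claim_equal_get_category_from_label : Prop := ∀ (label_name : String), Dom_get_category_from_label label_name → Spec_get_category_from_label label_name (get_category_from_label label_name)

-- ===== LEMMAS AND PROOFS =====

-- proof-side vocabulary: the three keyword lists, the eight prefix pairs, and the
-- canonical (priority, category) pairs
def pvK1 : List String := ["ENGINE", "OIL", "BATTERY", "ABS", "AIRBAG", "TEMP", "FUEL", "BRAKE", "DOOR", "SEATBELT"]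
def pvK2 : List String := ["SCRATCH", "DENT", "CRACK", "RUST", "PAINT"]
def pvK3 : List String := ["TIRE", "WHEEL", "FLAT", "WORN"]
def pvPrefixes : List (String × String) :=
  [("DASH_", "DASHBOARD"), ("EXT_", "EXTERIOR"), ("TIRE_", "TIRES_WHEELS_IMAGE"),
   ("GLASS_", "GLASS_WINDOWS"), ("LIGHT_", "LIGHTS"), ("ENG_", "ENGINE_ROOM"),
   ("UNDER_", "UNDERBODY"), ("INT_", "INTERIOR")]

def pvCat (p : Int) : String :=
  if p = 1 then "DASHBOARD" else if p = 2 then "EXTERIOR"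
  else if p = 3 then "TIRES_WHEELS_IMAGE" else "UNKNOWN_IMAGE"

def pvPC (p : Int) : Int × String := (p, pvCat p)

-- best keyword priority matching AT the head of l
def pvHd (l : List Char) : Int :=
  if pvK1.any (fun k => PySem.Chars.startswith l k.toList) then 1
  else if pvK2.any (fun k => PySem.Chars.startswith l k.toList) then 2
  else if pvK3.any (fun k => PySem.Chars.startswith l k.toList) then 3 else 4

-- best keyword priority matching ANYWHERE in l
def pvKw (l : List Char) : Int :=
  if pvK1.any (fun k => PySem.Chars.isIn k.toList l) then 1
  else if pvK2.any (fun k => PySem.Chars.isIn k.toList l) then 2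
  else if pvK3.any (fun k => PySem.Chars.isIn k.toList l) then 3 else 4

lemma pvIsIn_cons (k : List Char) (c : Char) (rest : List Char) :
    PySem.Chars.isIn k (c :: rest)
      = (PySem.Chars.startswith (c :: rest) k || PySem.Chars.isIn k rest) := by
  rcases hsw : PySem.Chars.startswith (c :: rest) k with _ | _
  · rcases hr : PySem.Chars.isIn k rest with _ | _
    · simp only [Bool.or_self]
      rw [PySem.Chars.isIn_eq_false_iff] at hr ⊢
      intro h
      rcases List.infix_cons_iff.mp h with h' | h'
      · exact absurd ((PySem.Chars.startswith_iff _ _).mpr h') (by simp [hsw])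
      · exact hr h'
    · simp only [Bool.or_true]
      exact (PySem.Chars.isIn_iff_infix _ _).mpr
        (List.infix_cons_iff.mpr (Or.inr ((PySem.Chars.isIn_iff_infix _ _).mp hr)))
  · simp only [Bool.true_or]
    exact (PySem.Chars.isIn_iff_infix _ _).mpr
      (List.infix_cons_iff.mpr (Or.inl ((PySem.Chars.startswith_iff _ _).mp hsw)))

lemma pvAny_isIn_cons (K : List String) (c : Char) (rest : List Char) :
    K.any (fun k => PySem.Chars.isIn k.toList (c :: rest))
      = (K.any (fun k => PySem.Chars.startswith (c :: rest) k.toList)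
          || K.any (fun k => PySem.Chars.isIn k.toList rest)) := by
  induction K with
  | nil => rfl
  | cons k K ih =>
    have h1 := pvIsIn_cons k.toList c rest
    have h2 := ih
    simp only [List.any_cons, h1, h2]
    cases PySem.Chars.startswith (c :: rest) k.toList <;>
      cases PySem.Chars.isIn k.toList rest <;> simp

-- fold of a same-priority keyword block
lemma pvKwFold (suffix : List Char) (atStart : Bool) (p : Int) (c : String)
    (kws : List String) (b : Int × String) :
    List.foldl (pvUpd suffix atStart) b (kws.map fun kw => (p, kw, false, c))
      = if p < b.1 ∧ kws.any (fun k => PySem.Chars.startswith suffix k.toList) then (p, c) else b := by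
  induction kws generalizing b with
  | nil => simp
  | cons kw kws ih =>
    simp only [List.map_cons, List.foldl_cons, List.any_cons]
    by_cases hp : p < b.1
    · by_cases hsw : PySem.Chars.startswith suffix kw.toList = true
      · have hupd : pvUpd suffix atStart b (p, kw, false, c) = (p, c) := by
          simp [pvUpd, hp, hsw]
        rw [hupd, ih]
        simp [hp, hsw]
      · have hupd : pvUpd suffix atStart b (p, kw, false, c) = b := by
          simp [pvUpd, hsw]
        rw [hupd, ih]
        simp [hp, Bool.eq_false_iff.mpr hsw]
    · have hupd : pvUpd suffix atStart b (p, kw, false, c) = b := by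
        simp [pvUpd, hp]
      rw [hupd, ih]
      simp [hp]

-- fold of the anchored block at position 0: the FIRST matching prefix wins
lemma pvAnchFold (l : List Char) (prs : List (String × String)) (b : Int × String) :
    List.foldl (pvUpd l true) b (prs.map fun pc => ((0 : Int), pc.1, true, pc.2))
      = if 0 < b.1 then
          (match prs.find? (fun pc => PySem.Chars.startswith l pc.1.toList) with
           | some pc => ((0 : Int), pc.2)
           | none => b)
        else b := by
  induction prs generalizing b with
  | nil => simp only [List.map_nil, List.foldl_nil, List.find?_nil]; split_ifs <;> rfl
  | cons pc prs ih =>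
    simp only [List.map_cons, List.foldl_cons, List.find?_cons]
    by_cases h0 : 0 < b.1
    · by_cases hsw : PySem.Chars.startswith l pc.1.toList = true
      · have hupd : pvUpd l true b (0, pc.1, true, pc.2) = (0, pc.2) := by
          simp [pvUpd, h0, hsw]
        rw [hupd, ih]
        simp [hsw, h0]
      · have hupd : pvUpd l true b (0, pc.1, true, pc.2) = b := by
          simp [pvUpd, hsw]
        rw [hupd, ih]
        simp [h0, hsw]
    · have hupd : pvUpd l true b (0, pc.1, true, pc.2) = b := by
        simp [pvUpd, h0]
      rw [hupd, ih]
      simp [h0]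

-- the anchored block is inert once the scan has left position 0
lemma pvAnchSkip (suffix : List Char) (b : Int × String) :
    List.foldl (pvUpd suffix false) b
      (pvPrefixes.map fun pc => ((0 : Int), pc.1, true, pc.2)) = b := by
  simp [pvPrefixes, pvUpd]

-- pvRules is the anchored block followed by the three keyword blocks
lemma pvRulesDecomp :
    pvRules = (pvPrefixes.map fun pc => ((0 : Int), pc.1, true, pc.2))
      ++ ((pvK1.map fun kw => ((1 : Int), kw, false, "DASHBOARD"))
      ++ ((pvK2.map fun kw => ((2 : Int), kw, false, "EXTERIOR"))
      ++ (pvK3.map fun kw => ((3 : Int), kw, false, "TIRES_WHEELS_IMAGE")))) := by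
  rfl

lemma pvHd_bounds (l : List Char) : 1 ≤ pvHd l ∧ pvHd l ≤ 4 := by
  unfold pvHd; split_ifs <;> norm_num

-- one off-position step merges the head priority into the accumulator
lemma pvStepFalse (l : List Char) (p : Int) (h1 : 1 ≤ p) (h4 : p ≤ 4) :
    pvStep l false (pvPC p) = pvPC (min (pvHd l) p) := by
  unfold pvStep
  rw [pvRulesDecomp, List.foldl_append, pvAnchSkip, List.foldl_append, List.foldl_append,
      pvKwFold, pvKwFold, pvKwFold]
  by_cases hA1 : (pvK1.any fun k => PySem.Chars.startswith l k.toList) = true <;>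
    by_cases hA2 : (pvK2.any fun k => PySem.Chars.startswith l k.toList) = true <;>
    by_cases hA3 : (pvK3.any fun k => PySem.Chars.startswith l k.toList) = true <;>
    interval_cases p <;>
    simp only [pvHd, pvPC, pvCat, hA1, hA2, hA3, Bool.not_eq_true] at * <;>
    norm_num [hA1, hA2, hA3]

-- once the accumulator's priority is ≤ 0 the rest of the scan changes nothing
lemma pvFoldStuck (l : List Char) (atStart : Bool) (b : Int × String) (hb : b.1 ≤ 0)
    (rs : List (Int × String × Bool × String)) (hrs : ∀ r ∈ rs, (0 : Int) ≤ r.1) :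
    List.foldl (pvUpd l atStart) b rs = b := by
  induction rs with
  | nil => rfl
  | cons r rs ih =>
    have h0 := hrs r (by simp)
    have hupd : pvUpd l atStart b r = b := by
      simp only [pvUpd]
      rw [if_neg]
      rintro ⟨hlt, -⟩; omega
    rw [List.foldl_cons, hupd, ih (fun r hr => hrs r (by simp [hr]))]

lemma pvStepStuck (l : List Char) (atStart : Bool) (b : Int × String) (hb : b.1 ≤ 0) :
    pvStep l atStart b = b :=
  pvFoldStuck l atStart b hb pvRules (by decide)

lemma pvScanStuck (l : List Char) (b : Int × String) (hb : b.1 ≤ 0) :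
    pvScan l false b = b := by
  induction l with
  | nil => show pvStep [] false b = b; exact pvStepStuck [] false b hb
  | cons c rest ih =>
    show pvScan rest false (pvStep (c :: rest) false b) = b
    rw [pvStepStuck (c :: rest) false b hb, ih]

-- the anywhere-priority distributes over cons
lemma pvKw_cons (c : Char) (rest : List Char) :
    pvKw (c :: rest) = min (pvHd (c :: rest)) (pvKw rest) := by
  unfold pvKw pvHd
  rw [pvAny_isIn_cons pvK1, pvAny_isIn_cons pvK2, pvAny_isIn_cons pvK3]
  by_cases hS1 : (pvK1.any fun k => PySem.Chars.startswith (c :: rest) k.toList) = true <;>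
    by_cases hS2 : (pvK2.any fun k => PySem.Chars.startswith (c :: rest) k.toList) = true <;>
    by_cases hS3 : (pvK3.any fun k => PySem.Chars.startswith (c :: rest) k.toList) = true <;>
    by_cases hR1 : (pvK1.any fun k => PySem.Chars.isIn k.toList rest) = true <;>
    by_cases hR2 : (pvK2.any fun k => PySem.Chars.isIn k.toList rest) = true <;>
    by_cases hR3 : (pvK3.any fun k => PySem.Chars.isIn k.toList rest) = true <;>
    simp only [Bool.not_eq_true] at * <;>
    simp [hS1, hS2, hS3, hR1, hR2, hR3]

-- keyword-only scan, closed form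
lemma pvScanFalse (l : List Char) (p : Int) (h1 : 1 ≤ p) (h4 : p ≤ 4) :
    pvScan l false (pvPC p) = pvPC (min (pvKw l) p) := by
  induction l generalizing p with
  | nil =>
    show pvStep [] false (pvPC p) = _
    rw [pvStepFalse [] p h1 h4]
    have hh : pvHd [] = 4 := by decide
    have hk : pvKw [] = 4 := by decide
    rw [hh, hk]
  | cons c rest ih =>
    show pvScan rest false (pvStep (c :: rest) false (pvPC p)) = _
    rw [pvStepFalse (c :: rest) p h1 h4]
    have hb := pvHd_bounds (c :: rest)
    rw [ih (min (pvHd (c :: rest)) p) (by omega) (by omega)]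
    have hc := pvKw_cons c rest
    congr 1
    omega

-- the position-0 step: first matching prefix, else the head keyword priority
lemma pvStepStart (l : List Char) :
    pvStep l true (4, "UNKNOWN_IMAGE")
      = (if PySem.Chars.startswith l "DASH_".toList then ((0 : Int), "DASHBOARD")
        else if PySem.Chars.startswith l "EXT_".toList then (0, "EXTERIOR")
        else if PySem.Chars.startswith l "TIRE_".toList then (0, "TIRES_WHEELS_IMAGE")
        else if PySem.Chars.startswith l "GLASS_".toList then (0, "GLASS_WINDOWS")
        else if PySem.Chars.startswith l "LIGHT_".toList then (0, "LIGHTS")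
        else if PySem.Chars.startswith l "ENG_".toList then (0, "ENGINE_ROOM")
        else if PySem.Chars.startswith l "UNDER_".toList then (0, "UNDERBODY")
        else if PySem.Chars.startswith l "INT_".toList then (0, "INTERIOR")
        else pvPC (pvHd l)) := by
  unfold pvStep
  rw [pvRulesDecomp, List.foldl_append, pvAnchFold, List.foldl_append, List.foldl_append,
      pvKwFold, pvKwFold, pvKwFold]
  simp only [pvPrefixes, List.find?_cons]
  by_cases h1 : PySem.Chars.startswith l ['D','A','S','H','_'] = true
  · simp [h1]
  by_cases h2 : PySem.Chars.startswith l ['E','X','T','_'] = true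
  · simp [h1, h2]
  by_cases h3 : PySem.Chars.startswith l ['T','I','R','E','_'] = true
  · simp [h1, h2, h3]
  by_cases h4 : PySem.Chars.startswith l ['G','L','A','S','S','_'] = true
  · simp [h1, h2, h3, h4]
  by_cases h5 : PySem.Chars.startswith l ['L','I','G','H','T','_'] = true
  · simp [h1, h2, h3, h4, h5]
  by_cases h6 : PySem.Chars.startswith l ['E','N','G','_'] = true
  · simp [h1, h2, h3, h4, h5, h6]
  by_cases h7 : PySem.Chars.startswith l ['U','N','D','E','R','_'] = true
  · simp [h1, h2, h3, h4, h5, h6, h7]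
  by_cases h8 : PySem.Chars.startswith l ['I','N','T','_'] = true
  · simp [h1, h2, h3, h4, h5, h6, h7, h8]
  · rw [Bool.not_eq_true] at h1 h2 h3 h4 h5 h6 h7 h8
    by_cases hA1 : (pvK1.any fun k => PySem.Chars.startswith l k.toList) = true <;>
      by_cases hA2 : (pvK2.any fun k => PySem.Chars.startswith l k.toList) = true <;>
      by_cases hA3 : (pvK3.any fun k => PySem.Chars.startswith l k.toList) = true <;>
      simp [h1, h2, h3, h4, h5, h6, h7, h8, hA1, hA2, hA3, pvHd, pvPC, pvCat]

-- A's keyword loop is 'any isIn' over the list (character-list view)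
lemma pvKwAnyEq (u : String) (ks : List String) :
    pvKwAny u ks = ks.any (fun k => PySem.Chars.isIn k.toList u.toList) := by
  induction ks with
  | nil => simp [pvKwAny]
  | cons k rest ih =>
    cases hk : PySem.Chars.isIn k.toList u.toList <;> simp [pvKwAny, ih, hk]

-- ===== VERDICT (by name: the statement is the Claim_ definition above) =====
set_option maxRecDepth 4096 in
theorem get_category_from_label_spec : Claim_equal_get_category_from_label := by
  intro label_name _
  unfold Spec_get_category_from_label get_category_from_label get_category_from_label_alt
  simp only [PySem.Str.startswith_eq, pvKwAnyEq]
  generalize (PySem.Str.upper label_name).toList = l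
  cases l with
  | nil => decide
  | cons c rest =>
    show _ = (pvScan rest false (pvStep (c :: rest) true (4, "UNKNOWN_IMAGE"))).2
    rw [pvStepStart]
    by_cases h1 : PySem.Chars.startswith (c :: rest) ['D','A','S','H','_'] = true
    · simp [h1, pvScanStuck]
    by_cases h2 : PySem.Chars.startswith (c :: rest) ['E','X','T','_'] = true
    · simp [h1, h2, pvScanStuck]
    by_cases h3 : PySem.Chars.startswith (c :: rest) ['T','I','R','E','_'] = true
    · simp [h1, h2, h3, pvScanStuck]
    by_cases h4 : PySem.Chars.startswith (c :: rest) ['G','L','A','S','S','_'] = true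
    · simp [h1, h2, h3, h4, pvScanStuck]
    by_cases h5 : PySem.Chars.startswith (c :: rest) ['L','I','G','H','T','_'] = true
    · simp [h1, h2, h3, h4, h5, pvScanStuck]
    by_cases h6 : PySem.Chars.startswith (c :: rest) ['E','N','G','_'] = true
    · simp [h1, h2, h3, h4, h5, h6, pvScanStuck]
    by_cases h7 : PySem.Chars.startswith (c :: rest) ['U','N','D','E','R','_'] = true
    · simp [h1, h2, h3, h4, h5, h6, h7, pvScanStuck]
    by_cases h8 : PySem.Chars.startswith (c :: rest) ['I','N','T','_'] = true
    · simp [h1, h2, h3, h4, h5, h6, h7, h8, pvScanStuck]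
    · have hb := pvHd_bounds (c :: rest)
      rw [Bool.not_eq_true] at h1 h2 h3 h4 h5 h6 h7 h8
      simp only [show ("DASH_" : String).toList = ['D','A','S','H','_'] from rfl,
          show ("EXT_" : String).toList = ['E','X','T','_'] from rfl,
          show ("TIRE_" : String).toList = ['T','I','R','E','_'] from rfl,
          show ("GLASS_" : String).toList = ['G','L','A','S','S','_'] from rfl,
          show ("LIGHT_" : String).toList = ['L','I','G','H','T','_'] from rfl,
          show ("ENG_" : String).toList = ['E','N','G','_'] from rfl,
          show ("UNDER_" : String).toList = ['U','N','D','E','R','_'] from rfl,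
          show ("INT_" : String).toList = ['I','N','T','_'] from rfl,
          h1, h2, h3, h4, h5, h6, h7, h8, Bool.false_eq_true, if_false]
      rw [pvScanFalse rest (pvHd (c :: rest)) (by omega) (by omega)]
      have hc := pvKw_cons c rest
      have hmin : min (pvKw rest) (pvHd (c :: rest)) = pvKw (c :: rest) := by omega
      rw [hmin]
      rw [show (["ENGINE", "OIL", "BATTERY", "ABS", "AIRBAG", "TEMP", "FUEL", "BRAKE", "DOOR", "SEATBELT"] : List String) = pvK1 from rfl,
          show (["SCRATCH", "DENT", "CRACK", "RUST", "PAINT"] : List String) = pvK2 from rfl,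
          show (["TIRE", "WHEEL", "FLAT", "WORN"] : List String) = pvK3 from rfl]
      unfold pvKw pvPC pvCat
      by_cases hA1 : (pvK1.any fun k => PySem.Chars.isIn k.toList (c :: rest)) = true <;>
        by_cases hA2 : (pvK2.any fun k => PySem.Chars.isIn k.toList (c :: rest)) = true <;>
        by_cases hA3 : (pvK3.any fun k => PySem.Chars.isIn k.toList (c :: rest)) = true <;>
        simp [hA1, hA2, hA3]
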